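-- pv_equiv track=rewrite | github.com/EchoLocalagency/EchoLocalClientTracker | scripts/seo_engine/captcha_audit.py | _detect_captcha
-- ===== SOURCE A (Python) =====
-- CAPTCHA_PATTERNS = {
--     "recaptcha_v2": [
--         "google.com/recaptcha",
--         "g-recaptcha",
--         "recaptcha/api.js",
--     ],
--     "recaptcha_v3": [
--         "recaptcha/api.js?render=",
--     ],
--     "hcaptcha": [
--         "hcaptcha.com",
--         "h-captcha",
--     ],
--     "turnstile": [
--         "challenges.cloudflare.com/turnstile",
--     ],
-- }
--
-- def _detect_captcha(html: str) -> tuple: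
--     """
--     Detect CAPTCHA type from HTML source.
--
--     Returns:
--         (status, method) tuple where:
--         - status: 'no_captcha', 'simple_captcha', or 'advanced_captcha'
--         - method: description of what was detected, or None
--     """
--     html_lower = html.lower()
--
--     # Check each pattern family
--     detected = {}
--     for captcha_type, patterns in CAPTCHA_PATTERNS.items():
--         for pattern in patterns:
--             if pattern.lower() in html_lower:
--                 detected[captcha_type] = pattern
--                 break
--
--     if not detected:
--         return "no_captcha", None
--
--     # Classify based on what was found
--     # reCAPTCHA v3 (invisible) = advanced
--     if "recaptcha_v3" in detected:
--         return "advanced_captcha", f"reCAPTCHA v3 ({detected['recaptcha_v3']})"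
--
--     # hCaptcha = advanced (image challenges)
--     if "hcaptcha" in detected:
--         return "advanced_captcha", f"hCaptcha ({detected['hcaptcha']})"
--
--     # Turnstile = advanced (Cloudflare managed challenge)
--     if "turnstile" in detected:
--         return "advanced_captcha", f"Cloudflare Turnstile ({detected['turnstile']})"
--
--     # reCAPTCHA v2 checkbox = simple
--     if "recaptcha_v2" in detected:
--         return "simple_captcha", f"reCAPTCHA v2 ({detected['recaptcha_v2']})"
--
--     return "no_captcha", None
-- ===== SOURCE B (Python) =====
-- _TABLE = [
--     (["recaptcha/api.js?render="], "advanced_captcha", "reCAPTCHA v3"),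
--     (["hcaptcha.com", "h-captcha"], "advanced_captcha", "hCaptcha"),
--     (["challenges.cloudflare.com/turnstile"], "advanced_captcha", "Cloudflare Turnstile"),
--     (["google.com/recaptcha", "g-recaptcha", "recaptcha/api.js"], "simple_captcha", "reCAPTCHA v2"),
-- ]
--
-- def _detect_captcha(html: str) -> tuple:
--     html_lower = html.lower()
--     for patterns, status, prefix in _TABLE:
--         for pattern in patterns:
--             if pattern in html_lower:
--                 return status, f"{prefix} ({pattern})"
--     return "no_captcha", None
-- ===== Notes on version B (the rewrite author's own statement) =====
-- stated objective: simpler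
-- what changed: Replaced the two-phase build-a-detected-dict-then-classify logic with a single priority-ordered table (v3, hCaptcha, Turnstile, v2) scanned once with an early return; the intermediate dict disappears.
import Mathlib
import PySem

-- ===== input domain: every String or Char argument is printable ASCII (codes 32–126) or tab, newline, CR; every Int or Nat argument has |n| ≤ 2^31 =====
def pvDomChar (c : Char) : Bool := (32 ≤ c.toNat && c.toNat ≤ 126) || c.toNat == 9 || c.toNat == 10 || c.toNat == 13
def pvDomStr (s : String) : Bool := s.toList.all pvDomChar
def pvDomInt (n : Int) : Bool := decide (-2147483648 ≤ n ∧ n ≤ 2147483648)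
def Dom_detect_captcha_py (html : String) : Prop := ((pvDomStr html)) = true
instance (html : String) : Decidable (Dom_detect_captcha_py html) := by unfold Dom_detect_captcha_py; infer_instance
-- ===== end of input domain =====

-- B replaces A's build-a-dict-then-classify two-phase logic by a single priority-ordered
-- table scanned once with an early return (objective: simpler).

-- ===== PORT A =====
-- the module constant CAPTCHA_PATTERNS, as an insertion-ordered dict
def CAPTCHA_PATTERNS : List (String × List String) :=
  [ ("recaptcha_v2", ["google.com/recaptcha", "g-recaptcha", "recaptcha/api.js"]),
    ("recaptcha_v3", ["recaptcha/api.js?render="]),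
    ("hcaptcha", ["hcaptcha.com", "h-captcha"]),
    ("turnstile", ["challenges.cloudflare.com/turnstile"]) ]

-- the inner 'for pattern in patterns: if pattern.lower() in html_lower: …; break'
-- (first matching pattern, or none) is List.find?
def detect_captcha_py (html : String) : String × Option String :=
  let html_lower := PySem.Str.lower html
  let detected : PySem.Dict String String :=
    CAPTCHA_PATTERNS.foldl (fun d tp =>
      match tp.2.find? (fun pattern => PySem.Str.isIn (PySem.Str.lower pattern) html_lower) with
      | some pattern => PySem.Dict.insert d tp.1 pattern
      | none => d) PySem.Dict.empty
  if PySem.Dict.size detected = 0 then ("no_captcha", none)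
  else
    match PySem.Dict.get? detected "recaptcha_v3" with
    | some p => ("advanced_captcha", "reCAPTCHA v3 (" ++ p ++ ")")
    | none =>
      match PySem.Dict.get? detected "hcaptcha" with
      | some p => ("advanced_captcha", "hCaptcha (" ++ p ++ ")")
      | none =>
        match PySem.Dict.get? detected "turnstile" with
        | some p => ("advanced_captcha", "Cloudflare Turnstile (" ++ p ++ ")")
        | none =>
          match PySem.Dict.get? detected "recaptcha_v2" with
          | some p => ("simple_captcha", "reCAPTCHA v2 (" ++ p ++ ")")
          | none => ("no_captcha", none)

-- ===== PORT B =====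
def pvTable : List (List String × String × String) :=
  [ (["recaptcha/api.js?render="], "advanced_captcha", "reCAPTCHA v3"),
    (["hcaptcha.com", "h-captcha"], "advanced_captcha", "hCaptcha"),
    (["challenges.cloudflare.com/turnstile"], "advanced_captcha", "Cloudflare Turnstile"),
    (["google.com/recaptcha", "g-recaptcha", "recaptcha/api.js"], "simple_captcha", "reCAPTCHA v2") ]

-- the outer 'for … in _TABLE' loop with its early return
def pvScan (html_lower : String) : List (List String × String × String) → String × Option String
  | [] => ("no_captcha", none)
  | row :: rest =>
    match row.1.find? (fun pattern => PySem.Str.isIn pattern html_lower) with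
    | some pattern => (row.2.1, some (row.2.2 ++ " (" ++ pattern ++ ")"))
    | none => pvScan html_lower rest

def detect_captcha_py_alt (html : String) : String × Option String :=
  pvScan (PySem.Str.lower html) pvTable

-- ===== PRECONDITION & SPEC =====
def Spec_detect_captcha_py (html : String) (out : String × Option String) : Prop := out = detect_captcha_py_alt html
instance (html : String) (out : String × Option String) : Decidable (Spec_detect_captcha_py html out) := by unfold Spec_detect_captcha_py; infer_instance

-- ===== CLAIM (what is proved, stated in full; the proofs are below) =====
def Claim_equal_detect_captcha_py : Prop := ∀ (html : String), Dom_detect_captcha_py html → Spec_detect_captcha_py html (detect_captcha_py html)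

-- ===== LEMMAS AND PROOFS =====

-- Str.lower is the identity on these lowercase literal patterns
theorem pv_low1 : PySem.Str.lower "google.com/recaptcha" = "google.com/recaptcha" := by decide
theorem pv_low2 : PySem.Str.lower "g-recaptcha" = "g-recaptcha" := by decide
theorem pv_low3 : PySem.Str.lower "recaptcha/api.js" = "recaptcha/api.js" := by decide
theorem pv_low4 : PySem.Str.lower "recaptcha/api.js?render=" = "recaptcha/api.js?render=" := by decide
theorem pv_low5 : PySem.Str.lower "hcaptcha.com" = "hcaptcha.com" := by decide
theorem pv_low6 : PySem.Str.lower "h-captcha" = "h-captcha" := by decide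
theorem pv_low7 : PySem.Str.lower "challenges.cloudflare.com/turnstile" = "challenges.cloudflare.com/turnstile" := by decide

-- on each (literal, all-lowercase) family list, A's predicate agrees with B's
theorem pv_fam1 (hl : String) :
    List.find? (fun pattern => PySem.Str.isIn (PySem.Str.lower pattern) hl)
      ["google.com/recaptcha", "g-recaptcha", "recaptcha/api.js"] =
    List.find? (fun pattern => PySem.Str.isIn pattern hl)
      ["google.com/recaptcha", "g-recaptcha", "recaptcha/api.js"] := by
  simp only [List.find?, pv_low1, pv_low2, pv_low3]
theorem pv_fam2 (hl : String) :
    List.find? (fun pattern => PySem.Str.isIn (PySem.Str.lower pattern) hl)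
      ["recaptcha/api.js?render="] =
    List.find? (fun pattern => PySem.Str.isIn pattern hl) ["recaptcha/api.js?render="] := by
  simp only [List.find?, pv_low4]
theorem pv_fam3 (hl : String) :
    List.find? (fun pattern => PySem.Str.isIn (PySem.Str.lower pattern) hl)
      ["hcaptcha.com", "h-captcha"] =
    List.find? (fun pattern => PySem.Str.isIn pattern hl) ["hcaptcha.com", "h-captcha"] := by
  simp only [List.find?, pv_low5, pv_low6]
theorem pv_fam4 (hl : String) :
    List.find? (fun pattern => PySem.Str.isIn (PySem.Str.lower pattern) hl)
      ["challenges.cloudflare.com/turnstile"] =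
    List.find? (fun pattern => PySem.Str.isIn pattern hl)
      ["challenges.cloudflare.com/turnstile"] := by
  simp only [List.find?, pv_low7]

-- ===== VERDICT (by name: the statement is the Claim_ definition above) =====
theorem detect_captcha_py_spec : Claim_equal_detect_captcha_py := by
  intro html _
  unfold Spec_detect_captcha_py detect_captcha_py detect_captcha_py_alt
  simp only [CAPTCHA_PATTERNS, pvTable, List.foldl, pvScan, pv_fam1, pv_fam2, pv_fam3, pv_fam4]
  cases hv2 : List.find? (fun pattern => PySem.Str.isIn pattern (PySem.Str.lower html))
      ["google.com/recaptcha", "g-recaptcha", "recaptcha/api.js"] <;>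
  cases hv3 : List.find? (fun pattern => PySem.Str.isIn pattern (PySem.Str.lower html))
      ["recaptcha/api.js?render="] <;>
  cases hh : List.find? (fun pattern => PySem.Str.isIn pattern (PySem.Str.lower html))
      ["hcaptcha.com", "h-captcha"] <;>
  cases ht : List.find? (fun pattern => PySem.Str.isIn pattern (PySem.Str.lower html))
      ["challenges.cloudflare.com/turnstile"] <;>
  rfl
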